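-- pv_equiv track=rewrite | github.com/marcelin-ne/Kivy_MD | base_layout_David/version_2/src/coordinates_control.py | generate_points_with_offset
-- ===== SOURCE A (Python) =====
-- def generate_points_with_offset(current_coordinates, hx=0, hy=0):
--     """
--     Genera nuevos puntos aplicando un desplazamiento (hx, hy) a las coordenadas actuales.
--     :param current_coordinates: Coordenadas actuales en el formato [x1, y1, x2, y2, ...]
--     :param hx: Desplazamiento en la dirección X
--     :param hy: Desplazamiento en la dirección Y
--     :return: Nuevos puntos después de aplicar el desplazamiento
--     """
--     if len(current_coordinates) % 2 != 0:
--         # Asegúrate de que la lista de coordenadas tiene una longitud par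
--         raise ValueError("La lista de coordenadas debe tener una longitud par")
--
--     new_points = []
--     for i in range(0, len(current_coordinates), 2):
--         # Para cada par de coordenadas (x, y), aplica el desplazamiento hx a la coordenada x
--         new_x = current_coordinates[i] + hx
--         new_y = current_coordinates[i + 1] + hy
--         new_points.extend([new_x, new_y])
--
--     return new_points
-- ===== SOURCE B (Python) =====
-- def generate_points_with_offset(current_coordinates, hx=0, hy=0):
--     if len(current_coordinates) % 2 != 0:
--         raise ValueError("La lista de coordenadas debe tener una longitud par")
--     return [c + (hx if i % 2 == 0 else hy)
--             for i, c in enumerate(current_coordinates)]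
-- ===== Notes on version B (the rewrite author's own statement) =====
-- stated objective: simpler
-- what changed: Replaces the pair-at-a-time index loop that extends an accumulator with a single flat comprehension over enumerate, choosing hx or hy by element-index parity.
import Mathlib
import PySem

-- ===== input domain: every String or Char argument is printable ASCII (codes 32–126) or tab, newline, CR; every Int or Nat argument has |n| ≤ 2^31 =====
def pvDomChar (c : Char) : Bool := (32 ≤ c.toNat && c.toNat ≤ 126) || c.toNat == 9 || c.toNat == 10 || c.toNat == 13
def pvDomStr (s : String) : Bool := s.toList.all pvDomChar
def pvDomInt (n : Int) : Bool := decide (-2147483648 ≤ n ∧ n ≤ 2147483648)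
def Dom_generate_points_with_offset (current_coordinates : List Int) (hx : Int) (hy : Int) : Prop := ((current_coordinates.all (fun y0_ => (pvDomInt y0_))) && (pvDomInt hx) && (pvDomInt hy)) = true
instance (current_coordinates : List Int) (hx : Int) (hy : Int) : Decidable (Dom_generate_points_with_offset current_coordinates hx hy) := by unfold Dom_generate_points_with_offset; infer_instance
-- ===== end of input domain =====

-- B replaces A's pair-at-a-time index loop with one flat enumerate-map choosing hx/hy by index parity (objective: simpler); same cost.

-- ===== PORT A =====
-- Loop of A: processes one coordinate pair per step, extending the accumulator new_points by two.
def pvA_loop : List Int → Int → Int → List Int → List Int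
  | [], _, _, acc => acc
  | [_], _, _, acc => acc  -- unreachable: the length check has already passed
  | x :: y :: rest, hx, hy, acc => pvA_loop rest hx hy (acc ++ [x + hx, y + hy])

def generate_points_with_offset (current_coordinates : List Int) (hx : Int) (hy : Int) : List Int :=
  if current_coordinates.length % 2 ≠ 0 then []  -- Python raises ValueError here; excluded by Pre_
  else pvA_loop current_coordinates hx hy []

-- ===== PORT B =====
def generate_points_with_offset_alt (current_coordinates : List Int) (hx : Int) (hy : Int) : List Int :=
  if current_coordinates.length % 2 ≠ 0 then []  -- ValueError in Source B; excluded by Pre_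
  else (PySem.List.enumerate current_coordinates 0).map
    (fun p => p.2 + (if p.1 % 2 == 0 then hx else hy))

-- ===== PRECONDITION & SPEC =====
-- Pre_ excludes odd-length coordinate lists, on which both A and B raise ValueError.
def Pre_generate_points_with_offset (current_coordinates : List Int) (hx : Int) (hy : Int) : Prop :=
  current_coordinates.length % 2 = 0
instance (current_coordinates : List Int) (hx : Int) (hy : Int) : Decidable (Pre_generate_points_with_offset current_coordinates hx hy) := by unfold Pre_generate_points_with_offset; infer_instance
def pvWitness_generate_points_with_offset : List Int × Int × Int := ([1, 2, 3, 4], 10, -1)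
def Spec_generate_points_with_offset (current_coordinates : List Int) (hx : Int) (hy : Int) (out : List Int) : Prop := out = generate_points_with_offset_alt current_coordinates hx hy
instance (current_coordinates : List Int) (hx : Int) (hy : Int) (out : List Int) : Decidable (Spec_generate_points_with_offset current_coordinates hx hy out) := by unfold Spec_generate_points_with_offset; infer_instance

-- ===== CLAIM (what is proved, stated in full; the proofs are below) =====
def Claim_equal_generate_points_with_offset : Prop := ∀ (current_coordinates : List Int) (hx : Int) (hy : Int), Dom_generate_points_with_offset current_coordinates hx hy → Pre_generate_points_with_offset current_coordinates hx hy → Spec_generate_points_with_offset current_coordinates hx hy (generate_points_with_offset current_coordinates hx hy)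

-- ===== LEMMAS AND PROOFS =====
theorem pvA_loop_eq_map_enumerate (xs : List Int) (s hx hy : Int) (acc : List Int)
    (hlen : xs.length % 2 = 0) (hs : s % 2 = 0) :
    pvA_loop xs hx hy acc =
      acc ++ (PySem.List.enumerate xs s).map (fun p => p.2 + (if p.1 % 2 == 0 then hx else hy)) := by
  induction xs, hx, hy, acc using pvA_loop.induct generalizing s with
  | case1 _ _ acc => simp [pvA_loop, PySem.List.enumerate_nil]
  | case2 z _ _ acc => simp at hlen
  | case3 x y rest hx hy acc ih =>
    have hr : rest.length % 2 = 0 := by simp at hlen ⊢; omega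
    have h1 : s % 2 == 0 := by simp [hs]
    have h2 : ¬ ((s + 1) % 2 == 0) := by simp; omega
    rw [pvA_loop, ih (s + 1 + 1) hr (by omega), PySem.List.enumerate_cons,
        PySem.List.enumerate_cons]
    simp only [List.map_cons, h1, if_pos, h2, List.append_assoc,
      List.cons_append, List.nil_append]
    norm_num

-- ===== VERDICT (by name: the statement is the Claim_ definition above) =====
theorem generate_points_with_offset_spec : Claim_equal_generate_points_with_offset := by
  intro xs hx hy _ hpre
  unfold Spec_generate_points_with_offset generate_points_with_offset generate_points_with_offset_alt
  rw [if_neg (by simpa using hpre), if_neg (by simpa using hpre)]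
  simpa using pvA_loop_eq_map_enumerate xs 0 hx hy [] hpre rfl
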